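-- pv_equiv track=rewrite | github.com/Anya497/DatasetExpander | dataset_expander.py | get_required_num
-- ===== SOURCE A (Python) =====
-- def get_required_num(pictures_info, len_num, required_pictures_num):
--     required_num = {}
--     for seq_len in pictures_info:
--         required_num[seq_len] = required_pictures_num // len_num
--     for seq_len in required_num:
--         if sum(required_num.values()) != required_pictures_num:
--             required_num[seq_len] += 1
--     return required_num
-- ===== SOURCE B (Python) =====
-- def get_required_num(pictures_info, len_num, required_pictures_num):
--     keys = list(dict.fromkeys(pictures_info))
--     if not keys:
--         return {}
--     base = required_pictures_num // len_num
--     total = base * len(keys)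
--     result = {}
--     for k in keys:
--         if total != required_pictures_num:
--             result[k] = base + 1
--             total += 1
--         else:
--             result[k] = base
--     return result
-- ===== Notes on version B (the rewrite author's own statement) =====
-- stated objective: faster
-- what changed: A mutates a dict in a second pass that re-sums all dict values before every key (O(n) per key); B builds the result in one pass while maintaining the running total in an accumulator, so the inner sum() scan disappears. Pre_ only excludes len_num = 0 with a nonempty input, where both programs raise ZeroDivisionError.
import Mathlib
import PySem

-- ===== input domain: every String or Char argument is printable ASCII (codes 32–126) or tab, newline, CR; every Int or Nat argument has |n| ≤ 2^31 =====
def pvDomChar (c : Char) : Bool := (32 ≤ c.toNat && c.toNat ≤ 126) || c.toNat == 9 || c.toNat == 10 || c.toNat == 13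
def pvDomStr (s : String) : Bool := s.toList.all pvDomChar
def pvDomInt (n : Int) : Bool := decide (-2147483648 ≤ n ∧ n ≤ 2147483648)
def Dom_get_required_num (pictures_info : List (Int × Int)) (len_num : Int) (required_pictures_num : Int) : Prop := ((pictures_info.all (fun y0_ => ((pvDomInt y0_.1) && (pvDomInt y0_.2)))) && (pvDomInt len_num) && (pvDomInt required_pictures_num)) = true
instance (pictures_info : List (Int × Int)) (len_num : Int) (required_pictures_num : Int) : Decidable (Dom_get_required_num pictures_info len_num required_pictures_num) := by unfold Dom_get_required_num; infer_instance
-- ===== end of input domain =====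

-- B builds the result dict in one pass while carrying the running total in an accumulator,
-- instead of A's second pass that re-sums all dict values before every key (objective: faster).
-- Return values only; neither program mutates its arguments.

-- ===== PORT A =====
-- `pictures_info` is a Python dict ported as an association list; `for seq_len in pictures_info`
-- iterates its keys = the distinct first components in first-occurrence order = PySem.List.dedup.
def get_required_num (pictures_info : List (Int × Int)) (len_num : Int) (required_pictures_num : Int) : List (Int × Int) :=
  let d0 : PySem.Dict Int Int :=
    (PySem.List.dedup (pictures_info.map Prod.fst)).foldl
      (fun d seq_len => d.insert seq_len (PySem.Int.floordiv required_pictures_num len_num))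
      PySem.Dict.empty
  let d1 :=
    d0.keys.foldl
      (fun d seq_len =>
        if d.values.sum ≠ required_pictures_num then d.modify seq_len 0 (· + 1) else d)
      d0
  d1.items

-- ===== PORT B =====
def get_required_num_alt (pictures_info : List (Int × Int)) (len_num : Int) (required_pictures_num : Int) : List (Int × Int) :=
  let keys := PySem.List.dedup (pictures_info.map Prod.fst)
  if keys = [] then []
  else
    let base := PySem.Int.floordiv required_pictures_num len_num
    let st :=
      keys.foldl
        (fun (acc : PySem.Dict Int Int × Int) k =>
          if acc.2 ≠ required_pictures_num then (acc.1.insert k (base + 1), acc.2 + 1)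
          else (acc.1.insert k base, acc.2))
        (PySem.Dict.empty, base * (keys.length : Int))
    st.1.items

-- ===== PRECONDITION & SPEC =====
-- Pre_ excludes exactly the inputs on which the Python A raises ZeroDivisionError:
-- a nonempty pictures_info with len_num = 0 (on empty input A never divides and returns {}).
def Pre_get_required_num (pictures_info : List (Int × Int)) (len_num : Int) (required_pictures_num : Int) : Prop := pictures_info = [] ∨ len_num ≠ 0
instance (pictures_info : List (Int × Int)) (len_num : Int) (required_pictures_num : Int) : Decidable (Pre_get_required_num pictures_info len_num required_pictures_num) := by unfold Pre_get_required_num; infer_instance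
def pvWitness_get_required_num : (List (Int × Int)) × Int × Int := ([(1, 2)], 1, 3)

def Spec_get_required_num (pictures_info : List (Int × Int)) (len_num : Int) (required_pictures_num : Int) (out : List (Int × Int)) : Prop := out = get_required_num_alt pictures_info len_num required_pictures_num
instance (pictures_info : List (Int × Int)) (len_num : Int) (required_pictures_num : Int) (out : List (Int × Int)) : Decidable (Spec_get_required_num pictures_info len_num required_pictures_num out) := by unfold Spec_get_required_num; infer_instance

-- ===== CLAIM (what is proved, stated in full; the proofs are below) =====
def Claim_equal_get_required_num : Prop := ∀ (pictures_info : List (Int × Int)) (len_num : Int) (required_pictures_num : Int), Dom_get_required_num pictures_info len_num required_pictures_num → Pre_get_required_num pictures_info len_num required_pictures_num → Spec_get_required_num pictures_info len_num required_pictures_num (get_required_num pictures_info len_num required_pictures_num)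

-- ===== LEMMAS AND PROOFS =====

-- value pattern of the result: first t keys hold base+1, the rest base
def pvPat (base : Int) (n t : Nat) : List Int :=
  (List.range n).map (fun i => if i < t then base + 1 else base)

lemma pvPat_length (base : Int) (n t : Nat) : (pvPat base n t).length = n := by
  simp [pvPat]

lemma pvPat_sum (base : Int) (n t : Nat) :
    (pvPat base n t).sum = base * n + min t n := by
  induction n with
  | zero => simp [pvPat]
  | succ m ih =>
    simp only [pvPat, List.range_succ, List.map_append, List.sum_append] at *
    rw [ih]
    by_cases h : m < t
    · simp [h]; push_cast; ring_nf; omega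
    · simp [h]; push_cast; ring_nf; omega

lemma pvPat_set (base : Int) (n j : Nat) (hj : j < n) :
    (pvPat base n j).set j (base + 1) = pvPat base n (j + 1) := by
  apply List.ext_getElem
  · simp [pvPat]
  · intro i h1 h2
    simp only [pvPat, List.length_set, List.length_map, List.length_range] at h1 h2 ⊢
    rw [List.getElem_set]
    by_cases hij : i = j <;> simp [pvPat, hij] <;> omega

lemma pvPat_snoc_eq (base : Int) (j t : Nat) (ht : t ≤ j) :
    pvPat base (j + 1) t = pvPat base j t ++ [base] := by
  have h : ¬ j < t := by omega
  simp [pvPat, List.range_succ, h]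

lemma pvPat_snoc_inc (base : Int) (j : Nat) :
    pvPat base (j + 1) (j + 1) = pvPat base j j ++ [base + 1] := by
  apply List.ext_getElem
  · simp [pvPat]
  · intro i h1 h2
    simp only [pvPat, List.length_map, List.length_range] at h1 h2
    have hlen : (pvPat base j j).length = j := pvPat_length ..
    by_cases hij : i < j
    · rw [List.getElem_append_left (by omega)]
      simp [pvPat]; omega
    · have hi : i = j := by omega
      subst hi
      rw [List.getElem_append_right (by omega)]
      simp [pvPat, hlen]

lemma zip_map_eq_of_getElem (ks : List Int) (j : Nat) (hj : j < ks.length)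
    (hnd : ks.Nodup) (vs : List Int) (hl : vs.length = ks.length) (w : Int) :
    (ks.zip vs).map (fun p => if p.1 == ks[j] then (ks[j], w) else p) = ks.zip (vs.set j w) := by
  apply List.ext_getElem
  · simp [hl]
  · intro i h1 h2
    simp only [List.length_map, List.length_zip, List.length_set, hl, Nat.min_self] at h1 h2
    rw [List.getElem_map, List.getElem_zip, List.getElem_zip]
    rw [List.getElem_set]
    by_cases hij : i = j
    · subst hij; simp
    · have : ks[i] ≠ ks[j] := by
        intro he; exact hij (List.Nodup.getElem_inj_iff hnd |>.mp he)
      simp [this]; omega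

lemma values_mk_zip (ks vs : List Int) (hl : vs.length = ks.length) :
    (PySem.Dict.mk (ks.zip vs)).values = vs := by
  simp [PySem.Dict.values]
  exact List.map_snd_zip (by omega)

lemma keys_mk_zip (ks vs : List Int) (hl : vs.length = ks.length) :
    (PySem.Dict.mk (ks.zip vs)).keys = ks := by
  simp [PySem.Dict.keys]
  exact List.map_fst_zip (by omega)

lemma getD_mk_zip (ks vs : List Int) (hnd : ks.Nodup) (hl : vs.length = ks.length)
    (j : Nat) (hj : j < ks.length) :
    (PySem.Dict.mk (ks.zip vs)).getD ks[j] 0 = vs[j]'(by omega) := by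
  apply PySem.Dict.getD_of_mem_items
  · have : (ks.zip vs)[j]'(by simp; omega) = (ks[j], vs[j]'(by omega)) := List.getElem_zip
    exact this ▸ List.getElem_mem _
  · rw [keys_mk_zip ks vs hl]; exact hnd

lemma contains_mk_zip (ks vs : List Int) (hl : vs.length = ks.length)
    (j : Nat) (hj : j < ks.length) :
    (PySem.Dict.mk (ks.zip vs)).contains ks[j] = true := by
  rw [PySem.Dict.contains_eq_decide_mem_keys, keys_mk_zip ks vs hl]
  simp

lemma modify_mk_zip (ks vs : List Int) (hnd : ks.Nodup) (hl : vs.length = ks.length)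
    (j : Nat) (hj : j < ks.length) :
    (PySem.Dict.mk (ks.zip vs)).modify ks[j] 0 (· + 1)
    = PySem.Dict.mk (ks.zip (vs.set j (vs[j]'(by omega) + 1))) := by
  rw [PySem.Dict.modify, getD_mk_zip ks vs hnd hl j hj, PySem.Dict.insert,
      contains_mk_zip ks vs hl j hj]
  simp only [if_true]
  congr 1
  exact zip_map_eq_of_getElem ks j hj hnd vs hl _

-- number of +1 increments performed after j loop steps
def pvT (diff : Int) (j : Nat) : Nat :=
  if 0 ≤ diff ∧ diff ≤ (j : Int) then diff.toNat else j

lemma pvT_le (diff : Int) (j : Nat) : pvT diff j ≤ j := by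
  unfold pvT; split <;> omega

lemma pvT_zero (diff : Int) : pvT diff 0 = 0 := by
  unfold pvT; split <;> omega

lemma not_mem_take (ks : List Int) (hnd : ks.Nodup) (j : Nat) (hj : j < ks.length) :
    ks[j] ∉ ks.take j := by
  intro h
  obtain ⟨i, hi, hie⟩ := List.getElem_of_mem h
  have hi' : i < j := by
    have := hi; simp [List.length_take] at this; omega
  rw [List.getElem_take] at hie
  have := (List.Nodup.getElem_inj_iff hnd).mp hie
  omega

-- A's second loop, characterised
lemma key_loop (ks : List Int) (hnd : ks.Nodup) (base R : Int) :
    ∀ (todo : List Int) (j : Nat), j + todo.length = ks.length → todo = ks.drop j →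
    todo.foldl
      (fun d seq_len => if d.values.sum ≠ R then d.modify seq_len 0 (· + 1) else d)
      (PySem.Dict.mk (ks.zip (pvPat base ks.length (pvT (R - base * ks.length) j))))
    = PySem.Dict.mk (ks.zip (pvPat base ks.length (pvT (R - base * ks.length) ks.length))) := by
  intro todo
  induction todo with
  | nil =>
    intro j hlen _
    simp only [List.length_nil, Nat.add_zero] at hlen
    subst hlen
    simp
  | cons k rest ih =>
    intro j hlen hdrop
    have hj : j < ks.length := by simp at hlen; omega
    have hsplit : ks.drop j = ks[j] :: ks.drop (j + 1) := List.drop_eq_getElem_cons hj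
    rw [hsplit] at hdrop
    obtain ⟨hk, hrest⟩ : k = ks[j] ∧ rest = ks.drop (j + 1) := by
      constructor <;> [exact (List.cons.injEq .. ▸ hdrop).1; exact (List.cons.injEq .. ▸ hdrop).2]
    have hvl : (pvPat base ks.length (pvT (R - base * ks.length) j)).length = ks.length :=
      pvPat_length ..
    have ht_le : pvT (R - base * ks.length) j ≤ ks.length :=
      le_trans (pvT_le _ _) (by omega)
    rw [List.foldl_cons, values_mk_zip _ _ hvl, pvPat_sum,
        Nat.min_eq_left ht_le]
    by_cases hc : base * (ks.length : Int) + (pvT (R - base * ks.length) j : Int) ≠ R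
    · rw [if_pos hc]
      have htj : pvT (R - base * ks.length) j = j := by
        unfold pvT at hc ⊢; split at hc
        · omega
        · split <;> omega
      have htj1 : pvT (R - base * ks.length) (j + 1) = j + 1 := by
        unfold pvT at hc ⊢
        split at hc
        · omega
        · split <;> omega
      rw [htj]
      rw [hk, modify_mk_zip ks (pvPat base ks.length j) hnd (pvPat_length ..) j hj]
      have hvj : (pvPat base ks.length j)[j]'(by rw [pvPat_length]; omega) = base := by
        simp [pvPat]
      rw [hvj, pvPat_set base ks.length j hj, ← htj1]
      exact ih (j + 1) (by simp at hlen ⊢; omega) hrest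
    · rw [if_neg hc]
      have ht1 : pvT (R - base * ks.length) (j + 1) = pvT (R - base * ks.length) j := by
        unfold pvT at hc ⊢
        split at hc
        · split <;> omega
        · split <;> omega
      rw [← ht1]
      exact ih (j + 1) (by simp at hlen ⊢; omega) hrest

lemma map_const_eq_zip_pat (ks : List Int) (base : Int) :
    ks.map (fun a => (a, base)) = ks.zip (pvPat base ks.length 0) := by
  apply List.ext_getElem
  · simp [pvPat]
  · intro i h1 h2
    simp only [List.getElem_map, List.getElem_zip]
    congr 1
    simp [pvPat]

lemma d0_eq (ks : List Int) (hnd : ks.Nodup) (base : Int) :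
    ks.foldl (fun d seq_len => d.insert seq_len base) PySem.Dict.empty
      = PySem.Dict.mk (ks.zip (pvPat base ks.length 0)) := by
  apply PySem.Dict.ext
  rw [PySem.Dict.items_foldl_insert_fresh ks (fun a => a) (fun _ => base) PySem.Dict.empty
      (by intro a _; exact PySem.Dict.contains_empty a) (by simpa using hnd)]
  simpa using map_const_eq_zip_pat ks base

lemma take_zip_snoc (ks : List Int) (j : Nat) (hj : j < ks.length)
    (p : List Int) (hl : p.length = j) (w : Int) :
    (ks.take j).zip p ++ [(ks[j], w)] = (ks.take (j + 1)).zip (p ++ [w]) := by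
  rw [List.take_succ, List.getElem?_eq_getElem hj]
  rw [List.zip_append (by simp [hl]; omega)]
  simp

lemma insert_mk_fresh (l : List (Int × Int)) (k v : Int) (hk : k ∉ l.map Prod.fst) :
    (PySem.Dict.mk l).insert k v = PySem.Dict.mk (l ++ [(k, v)]) := by
  have hc : (PySem.Dict.mk l).contains k = false := by
    rw [PySem.Dict.contains_eq_decide_mem_keys]
    simp [PySem.Dict.keys, hk]
  apply PySem.Dict.ext
  simp [PySem.Dict.items_insert, hc]

-- B's single pass with a running total, characterised
lemma alt_loop (ks : List Int) (hnd : ks.Nodup) (base R : Int) :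
    ∀ (todo : List Int) (j : Nat), j + todo.length = ks.length → todo = ks.drop j →
    (todo.foldl
      (fun (acc : PySem.Dict Int Int × Int) k =>
        if acc.2 ≠ R then (acc.1.insert k (base + 1), acc.2 + 1)
        else (acc.1.insert k base, acc.2))
      (PySem.Dict.mk ((ks.take j).zip (pvPat base j (pvT (R - base * ks.length) j))),
       base * (ks.length : Int) + pvT (R - base * ks.length) j)).1
    = PySem.Dict.mk (ks.zip (pvPat base ks.length (pvT (R - base * ks.length) ks.length))) := by
  intro todo
  induction todo with
  | nil =>
    intro j hlen _
    simp only [List.length_nil, Nat.add_zero] at hlen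
    subst hlen
    simp
  | cons k rest ih =>
    intro j hlen hdrop
    have hj : j < ks.length := by simp at hlen; omega
    have hsplit : ks.drop j = ks[j] :: ks.drop (j + 1) := List.drop_eq_getElem_cons hj
    rw [hsplit] at hdrop
    obtain ⟨hk, hrest⟩ : k = ks[j] ∧ rest = ks.drop (j + 1) := by
      constructor <;> [exact (List.cons.injEq .. ▸ hdrop).1; exact (List.cons.injEq .. ▸ hdrop).2]
    have ht_le : pvT (R - base * ks.length) j ≤ j := pvT_le _ _
    have hfresh : ks[j] ∉ (((ks.take j).zip (pvPat base j (pvT (R - base * ks.length) j))).map Prod.fst) := by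
      rw [List.map_fst_zip (by simp [pvPat_length, List.length_take])]
      exact not_mem_take ks hnd j hj
    rw [List.foldl_cons]
    by_cases hc : base * (ks.length : Int) + (pvT (R - base * ks.length) j : Int) ≠ R
    · rw [if_pos hc]
      have htj : pvT (R - base * ks.length) j = j := by
        unfold pvT at hc ⊢; split at hc
        · omega
        · split <;> omega
      have htj1 : pvT (R - base * ks.length) (j + 1) = j + 1 := by
        unfold pvT at hc ⊢
        split at hc
        · omega
        · split <;> omega
      rw [htj] at hfresh ⊢
      rw [hk, insert_mk_fresh _ _ _ hfresh,
          take_zip_snoc ks j hj _ (pvPat_length ..) (base + 1),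
          ← pvPat_snoc_inc base j]
      have htot : base * (ks.length : Int) + (j : Int) + 1
          = base * (ks.length : Int) + ((j + 1 : Nat) : Int) := by push_cast; ring
      rw [htot, ← htj1]
      have := ih (j + 1) (by simp at hlen ⊢; omega) hrest
      rw [htj1] at this ⊢
      exact this
    · rw [if_neg hc]
      have ht1 : pvT (R - base * ks.length) (j + 1) = pvT (R - base * ks.length) j := by
        unfold pvT at hc ⊢
        split at hc
        · split <;> omega
        · split <;> omega
      rw [hk, insert_mk_fresh _ _ _ hfresh,
          take_zip_snoc ks j hj _ (pvPat_length ..) base,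
          ← pvPat_snoc_eq base j _ ht_le, ← ht1]
      exact ih (j + 1) (by simp at hlen ⊢; omega) hrest

-- ===== VERDICT (by name: the statement is the Claim_ definition above) =====
theorem get_required_num_spec : Claim_equal_get_required_num := by
  intro pi len R _ _
  unfold Spec_get_required_num get_required_num get_required_num_alt
  dsimp only
  set base := PySem.Int.floordiv R len with hbase
  set ks := PySem.List.dedup (pi.map Prod.fst) with hks
  have hnd : ks.Nodup := PySem.List.nodup_dedup _
  have h0 : pvPat base ks.length 0 = pvPat base ks.length (pvT (R - base * ks.length) 0) := by
    rw [pvT_zero]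
  rw [d0_eq ks hnd base, keys_mk_zip _ _ (pvPat_length ..), h0,
      key_loop ks hnd base R ks 0 (by simp) (by simp)]
  by_cases hnil : ks = []
  · rw [if_pos hnil]
    simp [hnil]
  · rw [if_neg hnil]
    have hB := alt_loop ks hnd base R ks 0 (by simp) (by simp)
    rw [pvT_zero] at hB
    have hemp : PySem.Dict.mk (((ks.take 0).zip (pvPat base 0 0)) : List (Int × Int))
        = PySem.Dict.empty := rfl
    rw [hemp] at hB
    rw [show base * (ks.length : Int) + ((0 : Nat) : Int) = base * (ks.length : Int) by simp] at hB
    rw [hB]
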